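-- pv_equiv track=rewrite | github.com/yawen-guan/LineFollowingCar | Code/utility.py | getListValue
-- ===== SOURCE A (Python) =====
-- def getListValue(lst, goal):
--     cnt = {}
--     for v in lst:
--         if v not in cnt.keys():
--             cnt[v] = 1
--         else:
--             cnt[v] += 1
--         if cnt[v] >= goal:
--             return v
--     return None
-- ===== SOURCE B (Python) =====
-- def getListValue(lst, goal):
--     g = max(goal, 1)
--     positions = {}
--     for i, v in enumerate(lst):
--         positions[v] = positions.get(v, []) + [i]
--     best = None
--     for v, idxs in positions.items():
--         if len(idxs) >= g:
--             j = idxs[g - 1]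
--             if best is None or j < best[0]:
--                 best = (j, v)
--     return None if best is None else best[1]
-- ===== Notes on version B (the rewrite author's own statement) =====
-- stated objective: alternative
-- what changed: Replaces A's single running-count scan with early exit by a staged algorithm: one pass groups all occurrence indices per value, then a selection pass returns the value whose goal-th occurrence index is smallest (that index is exactly where A's running count first reaches the goal).
import Mathlib
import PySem

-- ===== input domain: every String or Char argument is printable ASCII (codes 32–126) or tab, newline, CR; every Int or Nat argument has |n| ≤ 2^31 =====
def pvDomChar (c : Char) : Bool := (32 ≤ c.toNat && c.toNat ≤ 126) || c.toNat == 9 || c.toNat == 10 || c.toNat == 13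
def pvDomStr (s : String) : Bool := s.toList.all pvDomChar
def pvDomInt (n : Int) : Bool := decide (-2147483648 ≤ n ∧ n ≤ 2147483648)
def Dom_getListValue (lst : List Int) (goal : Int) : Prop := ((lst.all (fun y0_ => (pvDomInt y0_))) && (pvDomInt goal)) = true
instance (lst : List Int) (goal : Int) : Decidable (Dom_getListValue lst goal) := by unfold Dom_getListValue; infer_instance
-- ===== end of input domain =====

-- B replaces A's single running-count scan by a staged algorithm: a grouping pass collects every
-- value's occurrence indices, then a selection pass returns the value whose goal-th occurrence
-- index is smallest (exactly the position where A's running count first reaches the goal).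

-- ===== PORT A =====
-- loop of A: carries the counting dict cnt
def getListValueGo (goal : Int) : List Int → PySem.Dict Int Int → Option Int
  | [], _ => none
  | v :: rest, cnt =>
    let cnt' := if cnt.contains v = false then cnt.insert v 1
                else cnt.insert v (cnt.getD v 0 + 1)
    if goal ≤ cnt'.getD v 0 then some v else getListValueGo goal rest cnt'

def getListValue (lst : List Int) (goal : Int) : Option Int :=
  getListValueGo goal lst PySem.Dict.empty

-- ===== PORT B =====
-- first loop of B: positions[v] = positions.get(v, []) + [i]  over enumerate(lst)
def getListValuePositions (lst : List Int) : PySem.Dict Int (List Int) :=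
  (PySem.List.enumerate lst).foldl
    (fun d p => d.insert p.2 (d.getD p.2 [] ++ [p.1])) PySem.Dict.empty

def getListValue_alt (lst : List Int) (goal : Int) : Option Int :=
  let g := max goal 1
  let positions := getListValuePositions lst
  -- second loop of B: keep the candidate (j, v) with the smallest goal-th occurrence index j
  let best := positions.items.foldl
    (fun best p =>
      if g ≤ PySem.List.len p.2 then
        match PySem.List.pyGet? p.2 (g - 1) with
        | some j =>
          match best with
          | none => some (j, p.1)
          | some b => if j < b.1 then some (j, p.1) else some b
        | none => best   -- unreachable guard: g-1 is in range whenever g ≤ len p.2 (g ≥ 1)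
      else best) none
  match best with
  | none => none
  | some b => some b.2

-- ===== PRECONDITION & SPEC =====
def Spec_getListValue (lst : List Int) (goal : Int) (out : Option Int) : Prop := out = getListValue_alt lst goal
instance (lst : List Int) (goal : Int) (out : Option Int) : Decidable (Spec_getListValue lst goal out) := by unfold Spec_getListValue; infer_instance

-- ===== CLAIM (what is proved, stated in full; the proofs are below) =====
def Claim_equal_getListValue : Prop := ∀ (lst : List Int) (goal : Int), Dom_getListValue lst goal → Spec_getListValue lst goal (getListValue lst goal)

-- ===== LEMMAS AND PROOFS =====

-- ---- A-side: the dict loop is the prefix-count loop, which is a find? over indices ----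

def frGo (goal : Int) : List Int → List Int → Option Int
  | [], _ => none
  | v :: rest, pre =>
    if goal ≤ ((pre ++ [v]).count v : Int) then some v else frGo goal rest (pre ++ [v])

theorem frGo_eq_find (goal : Int) : ∀ (suf pre : List Int),
    frGo goal suf pre =
      ((List.range suf.length).find? (fun i =>
          decide (goal ≤ (pre.count (suf.getD i 0) : Int) + ((suf.take (i+1)).count (suf.getD i 0) : Int)))).map
        (fun i => suf.getD i 0)
  | [], pre => by simp [frGo]
  | v :: r, pre => by
    have hh : (pre.count ((v::r).getD 0 0) : Int) + (((v::r).take 1).count ((v::r).getD 0 0) : Int)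
        = ((pre ++ [v]).count v : Int) := by
      simp [List.count_append]
    have htail : ∀ i : Nat,
        (decide (goal ≤ (pre.count ((v::r).getD (i+1) 0) : Int) + (((v::r).take (i+2)).count ((v::r).getD (i+1) 0) : Int)))
        = (decide (goal ≤ ((pre ++ [v]).count (r.getD i 0) : Int) + ((r.take (i+1)).count (r.getD i 0) : Int))) := by
      intro i
      have h1 : (v::r).getD (i+1) 0 = r.getD i 0 := rfl
      have h2 : (v::r).take (i+2) = v :: r.take (i+1) := rfl
      rw [h1, h2, decide_eq_decide]
      by_cases h : r.getD i 0 = v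
      · rw [h]
        simp [List.count_append]
        omega
      · simp [List.count_cons, List.count_append]
        omega
    rw [frGo]
    rw [List.length_cons, List.range_succ_eq_map, List.find?_cons]
    by_cases hg : goal ≤ ((pre ++ [v]).count v : Int)
    · rw [if_pos hg]
      have : (decide (goal ≤ (pre.count ((v::r).getD 0 0) : Int) + (((v::r).take 1).count ((v::r).getD 0 0) : Int))) = true := by
        rw [hh]; exact decide_eq_true hg
      simp only [this]
      rfl
    · rw [if_neg hg]
      have hfalse : (decide (goal ≤ (pre.count ((v::r).getD 0 0) : Int) + (((v::r).take 1).count ((v::r).getD 0 0) : Int))) = false := by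
        rw [hh]; exact decide_eq_false hg
      simp only [hfalse]
      rw [List.find?_map]
      rw [frGo_eq_find goal r (pre ++ [v])]
      have hfun : ((fun i =>
          decide (goal ≤ (pre.count ((v::r).getD i 0) : Int) + (((v::r).take (i+1)).count ((v::r).getD i 0) : Int))) ∘ Nat.succ)
          = (fun i => decide (goal ≤ ((pre ++ [v]).count (r.getD i 0) : Int) + ((r.take (i+1)).count (r.getD i 0) : Int))) := by
        funext i
        exact htail i
      rw [hfun]
      cases (List.range r.length).find? (fun i => decide (goal ≤ ((pre ++ [v]).count (r.getD i 0) : Int) + ((r.take (i+1)).count (r.getD i 0) : Int))) <;> rfl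

theorem go_eq_frGo (goal : Int) (l : List Int) (seen : List Int) (cnt : PySem.Dict Int Int)
    (h : ∀ x : Int, cnt.getD x 0 = (seen.count x : Int)) :
    getListValueGo goal l cnt = frGo goal l seen := by
  induction l generalizing seen cnt with
  | nil => rfl
  | cons v rest ih =>
    have hget : ∀ x : Int,
        (if cnt.contains v = false then cnt.insert v 1
         else cnt.insert v (cnt.getD v 0 + 1)).getD x 0 = ((seen ++ [v]).count x : Int) := by
      intro x
      by_cases hc : cnt.contains v = false
      · have hv0 : cnt.getD v 0 = 0 := PySem.Dict.getD_of_not_contains cnt 0 hc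
        have hcv : seen.count v = 0 := by
          have := h v; rw [hv0] at this; omega
        simp only [hc, if_true, PySem.Dict.getD_insert]
        by_cases hx : x = v
        · subst hx; simp [List.count_append, hcv]
        · simp [hx, Ne.symm hx, h x, List.count_append]
      · rw [if_neg hc, PySem.Dict.getD_insert]
        by_cases hx : x = v
        · subst hx; simp [List.count_append, h x]
        · simp [hx, Ne.symm hx, h x, List.count_append]
    simp only [getListValueGo, frGo]
    rw [hget v]
    split
    · rfl
    · exact ih _ _ hget

def reachP (lst : List Int) (goal : Int) (i : Nat) : Bool :=
  decide (goal ≤ (((lst.take (i+1)).count (lst.getD i 0) : Nat) : Int))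

theorem A_eq_find (lst : List Int) (goal : Int) :
    getListValue lst goal =
      ((List.range lst.length).find? (reachP lst goal)).map (fun i => lst.getD i 0) := by
  have h1 : getListValue lst goal = frGo goal lst [] :=
    go_eq_frGo goal lst [] PySem.Dict.empty (by intro x; simp)
  rw [h1, frGo_eq_find]
  have : (fun i => decide (goal ≤ ((List.count (lst.getD i 0) [] : Nat) : Int) + ((lst.take (i+1)).count (lst.getD i 0) : Int)))
      = reachP lst goal := by
    funext i
    simp [reachP]
  rw [this]

-- ---- occurrence-index machinery ----

def occN (lst : List Int) (v : Int) : List Nat :=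
  (List.range lst.length).filter (fun i => decide (lst.getD i 0 = v))

def occI (lst : List Int) (v : Int) : List Int := (occN lst v).map Int.ofNat

theorem mem_occN {lst : List Int} {v : Int} {i : Nat} :
    i ∈ occN lst v ↔ i < lst.length ∧ lst.getD i 0 = v := by
  simp [occN, List.mem_filter, List.mem_range]

theorem occN_pairwise (lst : List Int) (v : Int) : (occN lst v).Pairwise (· < ·) :=
  List.Pairwise.sublist List.filter_sublist List.pairwise_lt_range

theorem occN_append (lst : List Int) (x v : Int) :
    occN (lst ++ [x]) v = occN lst v ++ (if x = v then [lst.length] else []) := by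
  unfold occN
  rw [List.length_append, List.length_singleton, List.range_succ, List.filter_append]
  congr 1
  · apply List.filter_congr
    intro i hi
    rw [List.mem_range] at hi
    rw [List.getD_append _ _ _ _ hi]
  · have hx : (lst ++ [x]).getD lst.length 0 = x := by
      rw [List.getD_append_right _ _ _ _ (le_refl _)]
      simp
    by_cases h : x = v <;> simp [List.filter, hx, h]

theorem occN_length (lst : List Int) (v : Int) : (occN lst v).length = lst.count v := by
  induction lst using List.reverseRecOn with
  | nil => rfl
  | append_singleton l x ih =>
    rw [occN_append, List.count_append, List.length_append, ih]
    by_cases h : x = v <;> simp [List.count_singleton, h]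

theorem occN_eq_nil_of_not_mem {lst : List Int} {v : Int} (h : v ∉ lst) : occN lst v = [] := by
  rw [List.eq_nil_iff_forall_not_mem]
  intro i hi
  rw [mem_occN] at hi
  exact h (hi.2 ▸ (List.getD_eq_getElem lst 0 hi.1 ▸ List.getElem_mem hi.1))

theorem take_count (lst : List Int) (v : Int) (m : Nat) :
    (lst.take m).count v = ((occN lst v).filter (fun i => decide (i < m))).length := by
  induction lst using List.reverseRecOn with
  | nil => simp [occN]
  | append_singleton l x ih =>
    rw [occN_append, List.filter_append, List.take_append, List.length_append]
    by_cases hm : m ≤ l.length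
    · have h0 : m - l.length = 0 := by omega
      rw [h0]
      have h2 : (List.filter (fun i => decide (i < m)) (if x = v then [l.length] else [])) = [] := by
        by_cases h : x = v <;> simp [h] <;> omega
      rw [h2]
      simp [ih]
    · have hlt : l.length < m := by omega
      have h1 : l.take m = l := List.take_of_length_le (le_of_lt hlt)
      have h2 : ([x] : List Int).take (m - l.length) = [x] := by
        apply List.take_of_length_le; simp; omega
      have h3 : List.filter (fun i => decide (i < m)) (occN l v) = occN l v := by
        apply List.filter_eq_self.mpr
        intro a ha
        rw [mem_occN] at ha
        exact decide_eq_true (by omega)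
      rw [h1, h2, h3, List.count_append, occN_length]
      by_cases h : x = v <;> simp [List.count_singleton, h, hlt]

theorem sorted_count_lt_iff (S : List Nat) (hs : S.Pairwise (· < ·)) (k m : Nat) :
    k < (S.filter (fun i => decide (i < m))).length ↔ ∃ h : k < S.length, S[k] < m := by
  induction S generalizing k with
  | nil => simp
  | cons a T ih =>
    have ha : ∀ b ∈ T, a < b := (List.pairwise_cons.mp hs).1
    have hT : T.Pairwise (· < ·) := (List.pairwise_cons.mp hs).2
    by_cases ham : a < m
    · rw [List.filter_cons_of_pos (p := fun i => decide (i < m)) (decide_eq_true ham)]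
      cases k with
      | zero => simp [ham]
      | succ k =>
        simp only [List.length_cons, Nat.add_lt_add_iff_right, List.getElem_cons_succ]
        exact ih hT k
    · have hTf : T.filter (fun i => decide (i < m)) = [] := by
        apply List.filter_eq_nil_iff.mpr
        intro b hb
        simp only [decide_eq_true_eq]
        have := ha b hb
        omega
      rw [List.filter_cons_of_neg (p := fun i => decide (i < m)) (by simp; omega), hTf]
      simp only [List.length_nil]
      constructor
      · omega
      · rintro ⟨h, hlt⟩
        exfalso
        cases k with
        | zero => simp at hlt; omega
        | succ k =>
          have hk : k < T.length := by simp at h; omega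
          have hmem : T[k] ∈ T := List.getElem_mem hk
          have := ha _ hmem
          simp at hlt
          omega

theorem dedup_append (l : List Int) (x : Int) :
    PySem.List.dedup (l ++ [x]) = if x ∈ l then PySem.List.dedup l else PySem.List.dedup l ++ [x] := by
  rw [PySem.List.dedup_eq_ofList, PySem.List.dedup_eq_ofList, PySem.Set.ofList_eq_foldl,
    PySem.Set.ofList_eq_foldl, List.foldl_append, List.foldl_cons, List.foldl_nil]
  have hc : PySem.Set.contains (List.foldl PySem.Set.add [] l) x = decide (x ∈ l) := by
    unfold PySem.Set.contains
    rw [List.contains_eq_mem, ← PySem.Set.ofList_eq_foldl]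
    exact decide_eq_decide.mpr (PySem.Set.mem_ofList l x)
  show PySem.Set.add (List.foldl PySem.Set.add [] l) x = _
  rw [show PySem.Set.add (List.foldl PySem.Set.add [] l) x
      = if PySem.Set.contains (List.foldl PySem.Set.add [] l) x then List.foldl PySem.Set.add [] l
        else List.foldl PySem.Set.add [] l ++ [x] from rfl, hc]
  by_cases h : x ∈ l <;> simp [h]

-- ---- B-side: the grouping dict's items are exactly (value, its occurrence indices) ----

theorem occI_append (lst : List Int) (x v : Int) :
    occI (lst ++ [x]) v = occI lst v ++ (if x = v then [(lst.length : Int)] else []) := by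
  rw [occI, occN_append]
  by_cases h : x = v <;> simp [h, occI]

theorem buildPos_keys (l : List Int) : (getListValuePositions l).keys = PySem.Set.ofList l := by
  unfold getListValuePositions
  rw [PySem.Dict.keys_foldl_insert_key (PySem.List.enumerate l) (fun p => p.2)
    (fun d p => d.getD p.2 [] ++ [p.1]) PySem.Dict.empty]
  rw [PySem.Dict.keys_empty, PySem.List.map_snd_enumerate, PySem.Set.update_eq_foldl,
    PySem.Set.ofList_eq_foldl]

theorem buildPos_nodup (l : List Int) : (getListValuePositions l).keys.Nodup := by
  rw [buildPos_keys]
  exact PySem.Set.nodup_ofList l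

theorem buildPos_contains (l : List Int) (y : Int) :
    (getListValuePositions l).contains y = decide (y ∈ l) := by
  cases h : (getListValuePositions l).contains y with
  | true =>
    have := (PySem.Dict.contains_iff_mem_keys _ _).mp h
    rw [buildPos_keys, PySem.Set.mem_ofList] at this
    simp [this]
  | false =>
    have hn : ¬ y ∈ l := by
      intro hm
      have : (getListValuePositions l).contains y = true :=
        (PySem.Dict.contains_iff_mem_keys _ _).mpr
          (by rw [buildPos_keys]; exact (PySem.Set.mem_ofList l y).mpr hm)
      rw [h] at this
      cases this
    simp [hn]

theorem buildPos_items (lst : List Int) :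
    (getListValuePositions lst).items = (PySem.List.dedup lst).map (fun v => (v, occI lst v)) := by
  induction lst using List.reverseRecOn with
  | nil => rfl
  | append_singleton l x ih =>
    have hstep : getListValuePositions (l ++ [x])
        = (getListValuePositions l).insert x ((getListValuePositions l).getD x [] ++ [(l.length : Int)]) := by
      unfold getListValuePositions
      rw [PySem.List.enumerate_append, List.foldl_append, PySem.List.enumerate_cons,
        PySem.List.enumerate_nil]
      simp
    have hgetD : (getListValuePositions l).getD x [] = occI l x := by
      by_cases hx : x ∈ l
      · apply PySem.Dict.getD_of_mem_items _ _ (buildPos_nodup l)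
        rw [ih]
        exact List.mem_map_of_mem ((PySem.List.mem_dedup _ _).mpr hx)
      · rw [PySem.Dict.getD_of_not_contains _ _ (by rw [buildPos_contains]; simp [hx])]
        rw [occI, occN_eq_nil_of_not_mem hx]
        rfl
    rw [hstep]
    by_cases hx : x ∈ l
    · rw [PySem.Dict.items_insert_of_contains _ _ (by rw [buildPos_contains]; simp [hx])]
      rw [ih, dedup_append, if_pos hx, List.map_map]
      apply List.map_congr_left
      intro v hv
      simp only [Function.comp]
      by_cases hvx : v = x
      · subst hvx
        simp only [BEq.rfl, if_pos]
        rw [hgetD, occI_append, if_pos rfl]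
      · have hbeq : (v == x) = false := by simp [hvx]
        simp only [hbeq, Bool.false_eq_true, if_false]
        rw [occI_append, if_neg (fun h : x = v => hvx h.symm)]
        simp
    · rw [PySem.Dict.items_insert_of_not_contains _ _ (by rw [buildPos_contains]; simp [hx])]
      rw [ih, dedup_append, if_neg hx, List.map_append]
      congr 1
      · apply List.map_congr_left
        intro v hv
        have hvx : x ≠ v := by
          intro h; subst h; exact hx ((PySem.List.mem_dedup _ _).mp hv)
        rw [occI_append, if_neg hvx]
        simp
      · simp only [List.map_cons, List.map_nil]
        rw [hgetD, occI_append, if_pos rfl]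

-- ---- B-side: the selection loop picks the candidate with the minimal index ----

def chooseStep (best : Option (Int × Int)) (c : Int × Int) : Option (Int × Int) :=
  match best with
  | none => some c
  | some b => if c.1 < b.1 then some c else some b

def candOf (g : Int) (p : Int × List Int) : Option (Int × Int) :=
  if g ≤ PySem.List.len p.2 then (PySem.List.pyGet? p.2 (g-1)).map (fun j => (j, p.1)) else none

theorem fold_eq_choose (g : Int) (L : List (Int × List Int)) (acc : Option (Int × Int)) :
    L.foldl (fun best p =>
      if g ≤ PySem.List.len p.2 then
        match PySem.List.pyGet? p.2 (g - 1) with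
        | some j =>
          match best with
          | none => some (j, p.1)
          | some b => if j < b.1 then some (j, p.1) else some b
        | none => best
      else best) acc = (L.filterMap (candOf g)).foldl chooseStep acc := by
  induction L generalizing acc with
  | nil => rfl
  | cons p T ih =>
    rw [List.foldl_cons, List.filterMap_cons]
    by_cases hg : g ≤ PySem.List.len p.2
    · rw [if_pos hg]
      cases hj : PySem.List.pyGet? p.2 (g-1) with
      | none =>
        have : candOf g p = none := by rw [candOf, if_pos hg, hj]; rfl
        rw [this, ih]
      | some j =>
        have : candOf g p = some (j, p.1) := by rw [candOf, if_pos hg, hj]; rfl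
        rw [this, List.foldl_cons, ih]
        cases acc <;> rfl
    · rw [if_neg hg]
      have : candOf g p = none := by rw [candOf, if_neg hg]
      rw [this, ih]

theorem choose_some (C : List (Int × Int)) (b : Int × Int) :
    ∃ r, C.foldl chooseStep (some b) = some r ∧ (r ∈ C ∨ r = b) ∧ r.1 ≤ b.1 ∧ ∀ c ∈ C, r.1 ≤ c.1 := by
  induction C generalizing b with
  | nil => exact ⟨b, rfl, Or.inr rfl, le_refl _, by simp⟩
  | cons c T ih =>
    rw [List.foldl_cons]
    by_cases hc : c.1 < b.1
    · have hstep : chooseStep (some b) c = some c := by rw [chooseStep]; simp [hc]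
      rw [hstep]
      obtain ⟨r, h1, h2, h3, h4⟩ := ih c
      refine ⟨r, h1, ?_, le_trans h3 (le_of_lt hc), ?_⟩
      · rcases h2 with h | h
        · exact Or.inl (List.mem_cons_of_mem _ h)
        · exact Or.inl (h ▸ List.mem_cons_self)
      · intro d hd
        rcases List.mem_cons.mp hd with h | h
        · exact h ▸ h3
        · exact h4 d h
    · have hstep : chooseStep (some b) c = some b := by rw [chooseStep]; simp [hc]
      rw [hstep]
      obtain ⟨r, h1, h2, h3, h4⟩ := ih b
      refine ⟨r, h1, ?_, h3, ?_⟩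
      · rcases h2 with h | h
        · exact Or.inl (List.mem_cons_of_mem _ h)
        · exact Or.inr h
      · intro d hd
        rcases List.mem_cons.mp hd with h | h
        · subst h; omega
        · exact h4 d h

theorem candOf_char (g : Int) (hg : 1 ≤ g) (lst : List Int) (v : Int) :
    candOf g (v, occI lst v) =
      if h : (g-1).toNat < (occN lst v).length
      then some ((((occN lst v)[(g-1).toNat]'h : Nat) : Int), v)
      else none := by
  unfold candOf
  have hlen : PySem.List.len (occI lst v) = ((occN lst v).length : Int) := by
    simp [occI, PySem.List.len_eq]
  by_cases h : (g-1).toNat < (occN lst v).length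
  · rw [dif_pos h, if_pos (by rw [hlen]; omega)]
    conv_lhs => rw [show (g-1) = (((g-1).toNat : Nat) : Int) from by omega]
    have hval : (occI lst v)[(g-1).toNat]?
        = some (((occN lst v)[(g-1).toNat]'h : Nat) : Int) := by
      unfold occI
      rw [List.getElem?_map, List.getElem?_eq_getElem h]
      rfl
    rw [PySem.List.pyGet?_natCast, hval]
    rfl
  · rw [dif_neg h, if_neg (by rw [hlen]; omega)]

theorem reach_of_idx (lst : List Int) (goal : Int) (v : Int)
    (hk : ((max goal 1) - 1).toNat < (occN lst v).length) :
    (occN lst v)[((max goal 1) - 1).toNat]'hk < lst.length ∧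
    lst.getD ((occN lst v)[((max goal 1) - 1).toNat]'hk) 0 = v ∧
    reachP lst goal ((occN lst v)[((max goal 1) - 1).toNat]'hk) = true := by
  have hjm : (occN lst v)[((max goal 1) - 1).toNat]'hk ∈ occN lst v := List.getElem_mem hk
  have hj := mem_occN.mp hjm
  refine ⟨hj.1, hj.2, ?_⟩
  unfold reachP
  apply decide_eq_true
  rw [hj.2, take_count]
  have hcnt := (sorted_count_lt_iff (occN lst v) (occN_pairwise lst v)
      (((max goal 1) - 1).toNat) ((occN lst v)[((max goal 1) - 1).toNat]'hk + 1)).mpr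
      ⟨hk, by omega⟩
  have hgg : goal ≤ max goal 1 := le_max_left _ _
  omega

theorem idx_of_reach (lst : List Int) (goal : Int) (i : Nat) (hi : i < lst.length)
    (hr : reachP lst goal i = true) :
    ∃ hk : ((max goal 1) - 1).toNat < (occN lst (lst.getD i 0)).length,
      (occN lst (lst.getD i 0))[((max goal 1) - 1).toNat]'hk ≤ i := by
  have hmem : i ∈ occN lst (lst.getD i 0) := mem_occN.mpr ⟨hi, rfl⟩
  have hr' : goal ≤ ((lst.take (i+1)).count (lst.getD i 0) : Int) := of_decide_eq_true hr
  rw [take_count] at hr'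
  have h1 : 0 < ((occN lst (lst.getD i 0)).filter (fun x => decide (x < i+1))).length := by
    have hmem2 : i ∈ (occN lst (lst.getD i 0)).filter (fun x => decide (x < i+1)) :=
      List.mem_filter.mpr ⟨hmem, decide_eq_true (by omega)⟩
    exact List.length_pos_of_mem hmem2
  have h2 : ((max goal 1) - 1).toNat <
      ((occN lst (lst.getD i 0)).filter (fun x => decide (x < i+1))).length := by
    omega
  obtain ⟨hk', hlt⟩ := (sorted_count_lt_iff _ (occN_pairwise lst (lst.getD i 0)) _ _).mp h2
  exact ⟨hk', Nat.lt_succ_iff.mp hlt⟩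

theorem A_eq_B (lst : List Int) (goal : Int) : getListValue lst goal = getListValue_alt lst goal := by
  rw [A_eq_find]
  show _ = (match ((getListValuePositions lst).items.foldl
    (fun best p =>
      if max goal 1 ≤ PySem.List.len p.2 then
        match PySem.List.pyGet? p.2 (max goal 1 - 1) with
        | some j =>
          match best with
          | none => some (j, p.1)
          | some b => if j < b.1 then some (j, p.1) else some b
        | none => best
      else best) none) with
  | none => none
  | some b => some b.2)
  rw [buildPos_items, fold_eq_choose]
  have hg1 : (1:Int) ≤ max goal 1 := le_max_right _ _
  cases hfind : (List.range lst.length).find? (reachP lst goal) with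
  | none =>
    have hCnil : ((PySem.List.dedup lst).map (fun v => (v, occI lst v))).filterMap (candOf (max goal 1)) = [] := by
      rw [List.filterMap_eq_nil_iff]
      intro p hp
      obtain ⟨v, hv, rfl⟩ := List.mem_map.mp hp
      rw [candOf_char _ hg1 lst v, dif_neg]
      intro hk
      obtain ⟨h1, h2, h3⟩ := reach_of_idx lst goal v hk
      exact (List.find?_eq_none.mp hfind _ (List.mem_range.mpr h1)) h3
    rw [hCnil]
    rfl
  | some i =>
    obtain ⟨hPi, as, bs, hsplit, hmin⟩ := List.find?_eq_some_iff_append.mp hfind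
    have hlenn : lst.length = as.length + bs.length + 1 := by
      have := congrArg List.length hsplit
      simpa using this
    have hasn : as.length < lst.length := by omega
    have hias : i = as.length := by
      have h1 := congrArg (fun l => l[as.length]?) hsplit
      simp only [List.getElem?_append_right (le_refl as.length)] at h1
      rw [List.getElem?_range hasn] at h1
      simp at h1
      omega
    have has : as = List.range i := by
      have h1 := congrArg (fun l => l.take as.length) hsplit
      simp only [List.take_left] at h1
      rw [List.take_range] at h1
      rw [← h1]
      congr 1
      omega
    have hmin' : ∀ j, j < i → reachP lst goal j = false := by
      intro j hj
      have hjas : j ∈ as := has ▸ List.mem_range.mpr hj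
      have := hmin j hjas
      simpa using this
    have hi : i < lst.length := by omega
    obtain ⟨hk, hle⟩ := idx_of_reach lst goal i hi hPi
    obtain ⟨hj1, hj2, hj3⟩ := reach_of_idx lst goal (lst.getD i 0) hk
    have hji : (occN lst (lst.getD i 0))[(max goal 1 - 1).toNat]'hk = i := by
      rcases Nat.lt_or_ge ((occN lst (lst.getD i 0))[(max goal 1 - 1).toNat]'hk) i with h | h
      · exfalso
        have := hmin' _ h
        rw [hj3] at this
        cases this
      · exact le_antisymm hle h
    have hvmem : lst.getD i 0 ∈ lst := by
      rw [List.getD_eq_getElem lst 0 hi]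
      exact List.getElem_mem hi
    have hcmem : ((i : Int), lst.getD i 0) ∈
        ((PySem.List.dedup lst).map (fun v => (v, occI lst v))).filterMap (candOf (max goal 1)) := by
      apply List.mem_filterMap.mpr
      refine ⟨(lst.getD i 0, occI lst (lst.getD i 0)),
        List.mem_map_of_mem ((PySem.List.mem_dedup _ _).mpr hvmem), ?_⟩
      rw [candOf_char _ hg1 lst _, dif_pos hk, hji]
    cases hCv : ((PySem.List.dedup lst).map (fun v => (v, occI lst v))).filterMap (candOf (max goal 1)) with
    | nil => rw [hCv] at hcmem; cases hcmem
    | cons c T =>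
      rw [hCv] at hcmem
      obtain ⟨r, hr1, hr2, hr3, hr4⟩ := choose_some T c
      rw [List.foldl_cons, show chooseStep none c = some c from rfl]
      have hrC : r ∈ c :: T := by
        rcases hr2 with h | h
        · exact List.mem_cons_of_mem _ h
        · exact h ▸ List.mem_cons_self
      have hrmin : ∀ d ∈ c :: T, r.1 ≤ d.1 := by
        intro d hd
        rcases List.mem_cons.mp hd with h | h
        · exact h ▸ hr3
        · exact hr4 d h
      have hrC' : r ∈ ((PySem.List.dedup lst).map (fun v => (v, occI lst v))).filterMap (candOf (max goal 1)) := by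
        rw [hCv]; exact hrC
      obtain ⟨p, hp, hcand⟩ := List.mem_filterMap.mp hrC'
      obtain ⟨u, hu, rfl⟩ := List.mem_map.mp hp
      rw [candOf_char _ hg1 lst u] at hcand
      by_cases hku : (max goal 1 - 1).toNat < (occN lst u).length
      swap
      · rw [dif_neg hku] at hcand; cases hcand
      rw [dif_pos hku] at hcand
      have hr_eq : r = ((((occN lst u)[(max goal 1 - 1).toNat]'hku : Nat) : Int), u) :=
        (Option.some_injective _ hcand).symm
      obtain ⟨hu1, hu2, hu3⟩ := reach_of_idx lst goal u hku
      have hiju : i ≤ (occN lst u)[(max goal 1 - 1).toNat]'hku := by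
        rcases Nat.lt_or_ge ((occN lst u)[(max goal 1 - 1).toNat]'hku) i with h | h
        · exfalso
          have := hmin' _ h
          rw [hu3] at this
          cases this
        · omega
      have hjui : (occN lst u)[(max goal 1 - 1).toNat]'hku ≤ i := by
        have hmm := hrmin _ hcmem
        rw [hr_eq] at hmm
        have hmm2 : ((occN lst u)[(max goal 1 - 1).toNat]'hku : Int) ≤ (i : Int) := hmm
        exact_mod_cast hmm2
      have hju_eq : (occN lst u)[(max goal 1 - 1).toNat]'hku = i := le_antisymm hjui hiju
      have huv : u = lst.getD i 0 := by rw [← hu2, hju_eq]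
      rw [hr1, hr_eq]
      simp [huv]

-- ===== VERDICT (by name: the statement is the Claim_ definition above) =====
theorem getListValue_spec : Claim_equal_getListValue := by
  intro lst goal _
  unfold Spec_getListValue
  exact A_eq_B lst goal
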